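-- pv_equiv track=rewrite | github.com/rishabhmonga/practice | leet/IsomorphicStrings.py | get_char_mask
-- ===== SOURCE A (Python) =====
-- def get_char_mask(str1):
--     mask = []
--     count = 1
--     prev = str1[0]
--     for i in range(1, len(str1)):
--         curr = str1[i]
--         if curr == prev:
--             count += 1
--         else:
--             mask.append(count)
--             count = 1
--         prev = curr
--     mask.append(count)
--     return mask
-- ===== SOURCE B (Python) =====
-- def get_char_mask(str1):
--     # two-pointer run scan: for each run, advance j to its end and emit its width
--     runs = []
--     i = 0
--     n = len(str1)
--     while i < n:
--         j = i
--         while j < n and str1[j] == str1[i]: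
--             j += 1
--         runs.append(j - i)
--         i = j
--     return runs
-- ===== Notes on version B (the rewrite author's own statement) =====
-- stated objective: alternative
-- what changed: Replaces the prev/count state machine over indices 1..n-1 with a two-pointer run scan that finds each maximal run of equal characters and appends its width j-i.
-- outside the precondition, e.g. on get_char_mask(''): A raises IndexError, B returns []
-- crash fix: On the empty string A raises IndexError (it reads str1[0]); B naturally returns the empty list []. — e.g. on get_char_mask(""): A raises IndexError, B returns []
import Mathlib
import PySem

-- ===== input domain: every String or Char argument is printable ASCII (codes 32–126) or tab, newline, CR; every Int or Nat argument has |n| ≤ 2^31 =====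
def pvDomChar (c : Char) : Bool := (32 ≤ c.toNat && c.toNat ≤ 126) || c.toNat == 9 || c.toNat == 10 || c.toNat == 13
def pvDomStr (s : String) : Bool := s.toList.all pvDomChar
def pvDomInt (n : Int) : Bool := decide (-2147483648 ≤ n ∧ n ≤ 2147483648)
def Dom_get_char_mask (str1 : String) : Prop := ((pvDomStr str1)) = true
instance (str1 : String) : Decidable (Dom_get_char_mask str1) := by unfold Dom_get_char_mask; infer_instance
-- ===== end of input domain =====

-- B replaces A's prev/count state machine with a two-pointer run scan (alternative decomposition, same cost).

-- ===== PORT A =====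
def get_char_mask (str1 : String) : List Int :=
  let cs := str1.toList
  let prev0 := PySem.List.pyGetD cs 0 ' '
  let st := (PySem.List.pyRange 1 (cs.length : Int) 1).foldl
    (fun (st : List Int × Int × Char) i =>
      let curr := PySem.List.pyGetD cs i ' '
      if curr == st.2.2 then (st.1, st.2.1 + 1, curr)
      else (st.1 ++ [st.2.1], 1, curr))
    (([] : List Int), (1 : Int), prev0)
  st.1 ++ [st.2.1]

-- ===== PORT B =====
-- B's inner while loop (advance j while str1[j] == str1[i]) is takeWhile on the suffix;
-- the outer loop restarting at i = j is the recursive call on dropWhile.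
def altRuns (cs : List Char) : List Int :=
  match cs with
  | [] => []
  | c :: rest =>
      ((1 + (rest.takeWhile (· == c)).length : Nat) : Int) ::
        altRuns (rest.dropWhile (· == c))
  termination_by cs.length
  decreasing_by
    simp only [List.length_cons]
    exact Nat.lt_succ_of_le (List.length_dropWhile_le _ _)

def get_char_mask_alt (str1 : String) : List Int := altRuns str1.toList

-- ===== PRECONDITION & SPEC =====
-- A reads str1[0], so it raises IndexError on the empty string; Pre_ excludes exactly that.
def Pre_get_char_mask (str1 : String) : Prop := str1.toList ≠ []
instance (str1 : String) : Decidable (Pre_get_char_mask str1) := by unfold Pre_get_char_mask; infer_instance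
def pvWitness_get_char_mask : String := "aab"

-- On the empty string A raises IndexError (it reads str1[0]); B naturally returns [].
def Raises_get_char_mask (str1 : String) : Prop := str1.toList = []
instance (str1 : String) : Decidable (Raises_get_char_mask str1) := by unfold Raises_get_char_mask; infer_instance
def pvRaiseWitness_get_char_mask : String := ""
def pvRaiseWitnessOut_get_char_mask : List Int := []

def Spec_get_char_mask (str1 : String) (out : List Int) : Prop := out = get_char_mask_alt str1
instance (str1 : String) (out : List Int) : Decidable (Spec_get_char_mask str1 out) := by unfold Spec_get_char_mask; infer_instance

-- ===== CLAIM (what is proved, stated in full; the proofs are below) =====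
def Claim_equal_get_char_mask : Prop := ∀ (str1 : String), Dom_get_char_mask str1 → Pre_get_char_mask str1 → Spec_get_char_mask str1 (get_char_mask str1)
def Claim_raises_get_char_mask : Prop := (∀ (str1 : String), Dom_get_char_mask str1 → Raises_get_char_mask str1 → ¬ Pre_get_char_mask str1) ∧ (Dom_get_char_mask (pvRaiseWitness_get_char_mask) ∧ Raises_get_char_mask (pvRaiseWitness_get_char_mask) ∧ get_char_mask_alt (pvRaiseWitness_get_char_mask) = pvRaiseWitnessOut_get_char_mask)

-- ===== LEMMAS AND PROOFS =====

-- A's loop body, factored for the invariant lemma.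
def stepA (st : List Int × Int × Char) (curr : Char) : List Int × Int × Char :=
  if curr == st.2.2 then (st.1, st.2.1 + 1, curr)
  else (st.1 ++ [st.2.1], 1, curr)

-- Invariant: running A's state machine over `rest` and flushing the final count
-- yields the pending mask, the current run extended by rest's leading matches,
-- then the runs of the remainder.
lemma fold_stepA (rest : List Char) : ∀ (mask : List Int) (count : Int) (prev : Char),
    (rest.foldl stepA (mask, count, prev)).1 ++ [(rest.foldl stepA (mask, count, prev)).2.1]
      = mask ++ (count + ((rest.takeWhile (· == prev)).length : Int)) :: altRuns (rest.dropWhile (· == prev)) := by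
  induction rest with
  | nil => intro mask count prev; simp [altRuns]
  | cons c rest ih =>
      intro mask count prev
      by_cases h : c = prev
      · subst h
        simp only [List.foldl_cons, stepA, beq_self_eq_true, if_true, List.takeWhile_cons,
          List.dropWhile_cons]
        rw [ih mask (count + 1) c]
        simp; ring_nf
      · have hb : (c == prev) = false := by simp [h]
        simp only [List.foldl_cons, stepA, hb, Bool.false_eq_true, if_false, List.takeWhile_cons,
          List.dropWhile_cons]
        rw [ih (mask ++ [count]) 1 c]
        simp [altRuns]

theorem get_char_mask_eq (str1 : String) (h : Pre_get_char_mask str1) :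
    get_char_mask str1 = get_char_mask_alt str1 := by
  unfold Pre_get_char_mask at h
  obtain ⟨c, rest, hcs⟩ : ∃ c rest, str1.toList = c :: rest := by
    cases hx : str1.toList with
    | nil => exact absurd hx h
    | cons a l => exact ⟨a, l, rfl⟩
  unfold get_char_mask get_char_mask_alt
  simp only [hcs]
  rw [show (fun (st : List Int × Int × Char) i =>
        let curr := PySem.List.pyGetD (c :: rest) i ' '
        if curr == st.2.2 then (st.1, st.2.1 + 1, curr)
        else (st.1 ++ [st.2.1], 1, curr))
      = (fun st i => stepA st (PySem.List.pyGetD (c :: rest) i ' ')) from rfl]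
  rw [PySem.List.foldl_pyRange_pyGetD' (c :: rest) ' ' stepA _ (by norm_num : (0:Int) ≤ 1)]
  simp only [Int.toNat_one, List.drop_one, List.tail_cons]
  have h0 : PySem.List.pyGetD (c :: rest) 0 ' ' = c := by
    simp [PySem.List.pyGetD, PySem.List.pyGet?, PySem.List.pyIdx?]
  rw [h0, fold_stepA rest [] 1 c]
  simp [altRuns]

-- ===== VERDICT (by name: the statement is the Claim_ definition above) =====
theorem get_char_mask_spec : Claim_equal_get_char_mask := by
  intro str1 _ hpre
  unfold Spec_get_char_mask
  exact (get_char_mask_eq str1 hpre)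

@[simp] theorem get_char_mask_raises : Claim_raises_get_char_mask := by
  unfold Claim_raises_get_char_mask
  refine ⟨fun s _ hr hp => hp hr, by decide, by decide, ?_⟩
  simp [get_char_mask_alt, pvRaiseWitness_get_char_mask, pvRaiseWitnessOut_get_char_mask, altRuns]
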